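-- pv_equiv track=rewrite | github.com/jerryasher-challenges/challenge-interviewcake | 5-making-change.py | uniquify
-- ===== SOURCE A (Python) =====
-- def uniquify(patterns):
--     """remove duplicates from a set of change making patterns"""
--     s = set()
--     # patterns is a list of lists
--     # each pattern is a decomposition of the summands of the amount in terms
--     # of the denominations
--     # we sort the decomposition so that (2, 1) becomes (1, 2)
--     # stringify it
--     # toss it into a python set (to eliminate any dups)
--     # and return the set
--     for p in patterns:
--         p.sort()
--         strp = str(p)
--         s.add(strp)
--     elts = list(s)
--     elts.sort()
--     return elts
-- ===== SOURCE B (Python) =====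
-- def uniquify(patterns):
--     """remove duplicates from a set of change making patterns"""
--     strs = []
--     for p in patterns:
--         p.sort()
--         strs.append(str(p))
--     strs.sort()
--     out = []
--     for s in strs:
--         if not out or s != out[-1]:
--             out.append(s)
--     return out
-- ===== Notes on version B (the rewrite author's own statement) =====
-- stated objective: alternative
-- what changed: Replaces the hash-set dedup (add each stringified sorted pattern to a set, then sort the set) with a sort-then-scan: collect all stringified sorted patterns, sort the list of strings once, and drop consecutive duplicates in a single adjacent-comparison pass, so no set is maintained.
import Mathlib
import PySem

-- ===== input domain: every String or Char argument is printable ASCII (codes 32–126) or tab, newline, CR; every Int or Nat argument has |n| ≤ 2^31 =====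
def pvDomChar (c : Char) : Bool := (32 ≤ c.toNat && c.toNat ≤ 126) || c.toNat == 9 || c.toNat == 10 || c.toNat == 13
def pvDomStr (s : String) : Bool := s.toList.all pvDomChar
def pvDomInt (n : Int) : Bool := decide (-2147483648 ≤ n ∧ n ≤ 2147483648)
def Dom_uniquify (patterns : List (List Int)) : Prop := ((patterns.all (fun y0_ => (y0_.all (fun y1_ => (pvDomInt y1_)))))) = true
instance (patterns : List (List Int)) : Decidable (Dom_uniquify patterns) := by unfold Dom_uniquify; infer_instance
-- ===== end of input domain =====

-- B replaces A's hash-set dedup by sort-then-adjacent-scan dedup (objective: alternative).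
-- A mutates each pattern in place via p.sort(); B performs the same mutation; the theorems
-- here are about the RETURN value only.

-- ===== PORT A =====
-- str(p) for a sorted int list p: "[a, b, …]"
def strOfList (p : List Int) : String :=
  "[" ++ PySem.Str.join ", " (p.map PySem.Int.toStr) ++ "]"

def uniquify (patterns : List (List Int)) : List String :=
  let s := patterns.foldl
    (fun s p => PySem.Set.add s (strOfList (PySem.List.sorted p (fun x => x) false)))
    PySem.Set.empty
  PySem.List.sorted s (fun x => x) false

-- ===== PORT B =====
-- adjacent-duplicate removal on the tail, remembering the last kept string
def dedupGo (prev : String) : List String → List String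
  | [] => []
  | y :: ys => if y = prev then dedupGo prev ys else y :: dedupGo y ys

def dedupAdj : List String → List String
  | [] => []
  | x :: xs => x :: dedupGo x xs

def uniquify_alt (patterns : List (List Int)) : List String :=
  let strs := patterns.map (fun p => strOfList (PySem.List.sorted p (fun x => x) false))
  dedupAdj (PySem.List.sorted strs (fun x => x) false)

-- ===== PRECONDITION & SPEC =====
def Spec_uniquify (patterns : List (List Int)) (out : List String) : Prop := out = uniquify_alt patterns
instance (patterns : List (List Int)) (out : List String) : Decidable (Spec_uniquify patterns out) := by unfold Spec_uniquify; infer_instance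

-- ===== CLAIM (what is proved, stated in full; the proofs are below) =====
def Claim_equal_uniquify : Prop := ∀ (patterns : List (List Int)), Dom_uniquify patterns → Spec_uniquify patterns (uniquify patterns)

-- ===== LEMMAS AND PROOFS =====

theorem dedupGo_spec (l : List String) : ∀ (prev : String),
    l.Pairwise (· ≤ ·) → (∀ y ∈ l, prev ≤ y) →
    (dedupGo prev l).Pairwise (· < ·) ∧ ∀ y ∈ dedupGo prev l, prev < y ∧ y ∈ l := by
  induction l with
  | nil => intro prev _ _; simp [dedupGo]
  | cons y ys ih =>
    intro prev hpw hle
    have hys : ys.Pairwise (· ≤ ·) := hpw.of_cons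
    have hyle : ∀ z ∈ ys, y ≤ z := by
      intro z hz; exact (List.pairwise_cons.mp hpw).1 z hz
    by_cases hy : y = prev
    · subst hy
      simp only [dedupGo, if_pos]
      obtain ⟨h1, h2⟩ := ih y hys hyle
      exact ⟨h1, fun z hz => ⟨(h2 z hz).1, List.mem_cons_of_mem _ (h2 z hz).2⟩⟩
    · have hprev : prev < y := lt_of_le_of_ne (hle y (List.mem_cons_self)) (Ne.symm hy)
      simp only [dedupGo, if_neg hy]
      obtain ⟨h1, h2⟩ := ih y hys hyle
      refine ⟨List.pairwise_cons.mpr ⟨fun z hz => (h2 z hz).1, h1⟩, ?_⟩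
      intro z hz
      rcases List.mem_cons.mp hz with rfl | hz
      · exact ⟨hprev, List.mem_cons_self⟩
      · exact ⟨lt_trans hprev (h2 z hz).1, List.mem_cons_of_mem _ (h2 z hz).2⟩

theorem dedupGo_complete (l : List String) : ∀ (prev : String),
    ∀ z ∈ l, z = prev ∨ z ∈ dedupGo prev l := by
  induction l with
  | nil => intro prev z hz; cases hz
  | cons y ys ih =>
    intro prev z hz
    by_cases hy : y = prev
    · subst hy
      simp only [dedupGo, if_pos]
      rcases List.mem_cons.mp hz with rfl | hz
      · exact Or.inl rfl
      · exact ih y z hz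
    · simp only [dedupGo, if_neg hy]
      rcases List.mem_cons.mp hz with rfl | hz
      · exact Or.inr List.mem_cons_self
      · rcases ih y z hz with rfl | h
        · exact Or.inr List.mem_cons_self
        · exact Or.inr (List.mem_cons_of_mem _ h)

-- dedupAdj of a (≤)-sorted list is strictly increasing and has the same members
theorem dedupAdj_spec (l : List String) (hpw : l.Pairwise (· ≤ ·)) :
    (dedupAdj l).Pairwise (· < ·) ∧ ∀ z, z ∈ dedupAdj l ↔ z ∈ l := by
  cases l with
  | nil => simp [dedupAdj]
  | cons x xs =>
    have hxs : xs.Pairwise (· ≤ ·) := hpw.of_cons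
    have hxle : ∀ z ∈ xs, x ≤ z := fun z hz => (List.pairwise_cons.mp hpw).1 z hz
    obtain ⟨h1, h2⟩ := dedupGo_spec xs x hxs hxle
    simp only [dedupAdj]
    constructor
    · exact List.pairwise_cons.mpr ⟨fun z hz => (h2 z hz).1, h1⟩
    · intro z
      constructor
      · intro hz
        rcases List.mem_cons.mp hz with rfl | hz
        · exact List.mem_cons_self
        · exact List.mem_cons_of_mem _ (h2 z hz).2
      · intro hz
        rcases List.mem_cons.mp hz with rfl | hz
        · exact List.mem_cons_self
        · rcases dedupGo_complete xs x z hz with rfl | h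
          · exact List.mem_cons_self
          · exact List.mem_cons_of_mem _ h

-- ===== VERDICT (by name: the statement is the Claim_ definition above) =====
theorem uniquify_spec : Claim_equal_uniquify := by
  unfold Claim_equal_uniquify
  intro patterns _
  unfold Spec_uniquify uniquify uniquify_alt
  set strs := patterns.map (fun p => strOfList (PySem.List.sorted p (fun x => x) false)) with hstrs
  have hfold : patterns.foldl
      (fun s p => PySem.Set.add s (strOfList (PySem.List.sorted p (fun x => x) false)))
      PySem.Set.empty = PySem.Set.ofList strs := by
    rw [hstrs, PySem.Set.ofList_eq_foldl, List.foldl_map]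
    rfl
  simp only [hfold]
  have hsortedpw : (PySem.List.sorted strs (fun x => x) false).Pairwise (· ≤ ·) := by
    have := PySem.List.sorted_pairwise strs (fun x => x)
    simpa using this
  obtain ⟨hlt, hmem⟩ := dedupAdj_spec _ hsortedpw
  apply PySem.List.sorted_eq_of_perm_of_pairwise_lt
  · -- permutation with the set of strs
    have hnd : (dedupAdj (PySem.List.sorted strs (fun x => x) false)).Nodup :=
      hlt.imp ne_of_lt
    have hnd2 : (PySem.Set.ofList strs).Nodup := PySem.Set.nodup_ofList strs
    rw [List.perm_ext_iff_of_nodup hnd hnd2]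
    intro z
    rw [hmem z, PySem.Set.mem_ofList]
    exact PySem.List.mem_sorted (xs := strs) (key := fun x : String => x) (rev := false) (x := z)
  · simpa using hlt
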